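-- pv_equiv track=rewrite | github.com/fathonix/Tugas-Alpro | Tubes/kosong_bersama.py | search_free_students
-- ===== SOURCE A (Python) =====
-- def search_free_students(free_schedule_data, day, session, original_lines):
--     free_students = []
--     for student, schedule in free_schedule_data.items():
--         if session in schedule.get(day, []):
--             free_students.append(student)
--
--     free_students_with_nim = []
--     for student in free_students:
--         matching_lines = [line for line in original_lines if student in line]
--         if matching_lines:
--             data = matching_lines[0].strip().split("\t")
--             nim = data[0]
--             free_students_with_nim.append(f"{student} - {nim}")
--         else:
--             free_students_with_nim.append(f"{student}")
--
--     return free_students_with_nim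
-- ===== SOURCE B (Python) =====
-- def search_free_students(free_schedule_data, day, session, original_lines):
--     free_students = [student for student, schedule in free_schedule_data.items()
--                      if session in schedule.get(day, [])]
--     # single pass over the document: first line containing each free student
--     nim_of = {}
--     for line in original_lines:
--         for student in free_students:
--             if student not in nim_of and student in line:
--                 nim_of[student] = line.strip().split("\t")[0]
--     return [f"{student} - {nim_of[student]}" if student in nim_of else f"{student}"
--             for student in free_students]
-- ===== Notes on version B (the rewrite author's own statement) =====
-- stated objective: alternative
-- what changed: B inverts the nesting: instead of filtering all lines per free student, it scans the document once, maintaining a first-match dict from free student to the NIM of the first line containing it, then formats the output from that dict.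
import Mathlib
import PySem

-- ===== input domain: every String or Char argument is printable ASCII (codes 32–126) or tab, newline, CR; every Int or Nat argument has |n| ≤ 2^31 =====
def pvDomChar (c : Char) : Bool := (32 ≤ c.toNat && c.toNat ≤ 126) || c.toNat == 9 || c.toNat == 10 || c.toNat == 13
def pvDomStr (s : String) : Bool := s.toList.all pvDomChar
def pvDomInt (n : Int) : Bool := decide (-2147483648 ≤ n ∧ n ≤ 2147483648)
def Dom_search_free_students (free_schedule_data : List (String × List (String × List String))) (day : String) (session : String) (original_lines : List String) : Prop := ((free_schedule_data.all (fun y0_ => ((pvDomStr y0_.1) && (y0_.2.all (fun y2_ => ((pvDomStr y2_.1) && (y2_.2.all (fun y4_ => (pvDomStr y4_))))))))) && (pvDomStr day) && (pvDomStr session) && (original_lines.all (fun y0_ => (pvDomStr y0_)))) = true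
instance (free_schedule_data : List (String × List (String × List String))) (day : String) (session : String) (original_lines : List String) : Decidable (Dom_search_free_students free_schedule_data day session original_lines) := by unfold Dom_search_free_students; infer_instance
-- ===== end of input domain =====

-- B replaces A's per-student rescans of the whole document by ONE pass over the lines
-- maintaining a first-match dict student ↦ NIM (objective: alternative decomposition, same O(S·L) cost).

-- ===== PORT A =====
def search_free_students (free_schedule_data : List (String × List (String × List String))) (day : String) (session : String) (original_lines : List String) : List String :=
  let free_students := free_schedule_data.foldl (fun acc p =>
      if (((PySem.Dict.mk p.2).getD day []).contains session) then acc ++ [p.1] else acc) []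
  free_students.foldl (fun acc student =>
    match original_lines.filter (fun line => PySem.Str.isIn student line) with
    | [] => acc ++ [student]
    | m :: _ => acc ++ [student ++ " - " ++ ((PySem.Str.split? (PySem.Str.strip m) "\t").getD []).headD ""]) []

-- ===== PORT B =====
-- B-side helper: NIM of a line = first tab-field of the stripped line
def sfsNim (line : String) : String := ((PySem.Str.split? (PySem.Str.strip line) "\t").getD []).headD ""

def search_free_students_alt (free_schedule_data : List (String × List (String × List String))) (day : String) (session : String) (original_lines : List String) : List String :=
  let free_students := (free_schedule_data.filter (fun p =>
      ((PySem.Dict.mk p.2).getD day []).contains session)).map (fun p => p.1)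
  let nim_of : PySem.Dict String String := original_lines.foldl (fun d line =>
      free_students.foldl (fun d student =>
        if !(d.contains student) && PySem.Str.isIn student line
        then d.insert student (sfsNim line) else d) d) PySem.Dict.empty
  free_students.map (fun student =>
    match nim_of.get? student with
    | some nim => student ++ " - " ++ nim
    | none => student)

-- ===== PRECONDITION & SPEC =====
def Spec_search_free_students (free_schedule_data : List (String × List (String × List String))) (day : String) (session : String) (original_lines : List String) (out : List String) : Prop := out = search_free_students_alt free_schedule_data day session original_lines
instance (free_schedule_data : List (String × List (String × List String))) (day : String) (session : String) (original_lines : List String) (out : List String) : Decidable (Spec_search_free_students free_schedule_data day session original_lines out) := by unfold Spec_search_free_students; infer_instance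

-- ===== CLAIM (what is proved, stated in full; the proofs are below) =====
def Claim_equal_search_free_students : Prop := ∀ (free_schedule_data : List (String × List (String × List String))) (day : String) (session : String) (original_lines : List String), Dom_search_free_students free_schedule_data day session original_lines → Spec_search_free_students free_schedule_data day session original_lines (search_free_students free_schedule_data day session original_lines)

-- ===== LEMMAS AND PROOFS =====

-- one line of B's inner loop: the dict gains s ↦ nim iff s is free, not yet known, and occurs in the line
lemma sfs_inner_get (line : String) (free : List String) (d : PySem.Dict String String) (s : String) :
    (free.foldl (fun d student =>
        if !(d.contains student) && PySem.Str.isIn student line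
        then d.insert student (sfsNim line) else d) d).get? s =
    if s ∈ free ∧ d.get? s = none ∧ PySem.Str.isIn s line = true
    then some (sfsNim line) else d.get? s := by
  induction free generalizing d with
  | nil => simp
  | cons t rest ih =>
    simp only [List.foldl_cons]
    rw [ih]
    by_cases hts : s = t
    · subst hts
      rcases h : d.get? s with _ | v
      · have hc : d.contains s = false := by
          rw [PySem.Dict.contains_eq_isSome_get?, h]; rfl
        by_cases hin : PySem.Chars.isIn s.toList line.toList = true
        · simp [hc, hin, PySem.Dict.get?_insert_self]
        · simp only [Bool.not_eq_true] at hin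
          simp [hc, hin, h]
      · have hc : d.contains s = true := by
          rw [PySem.Dict.contains_eq_isSome_get?, h]; rfl
        simp [hc, h]
    · have hgd : (if (!d.contains t && PySem.Str.isIn t line) = true
          then d.insert t (sfsNim line) else d).get? s = d.get? s := by
        split
        · exact PySem.Dict.get?_insert_of_ne d _ hts
        · rfl
      rw [hgd]
      simp [List.mem_cons, hts]

-- B's line loop computes, for every free student, the NIM of the first matching line
lemma sfs_outer_get (free : List String) (lines : List String)
    (d : PySem.Dict String String) (s : String) (hs : s ∈ free) :
    (lines.foldl (fun d line =>
        free.foldl (fun d student =>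
          if !(d.contains student) && PySem.Str.isIn student line
          then d.insert student (sfsNim line) else d) d) d).get? s =
    (d.get? s).or
      (((lines.filter (fun l => PySem.Str.isIn s l)).head?).map sfsNim) := by
  induction lines generalizing d with
  | nil => simp
  | cons line rest ih =>
    simp only [List.foldl_cons]
    rw [ih, sfs_inner_get]
    rcases h : d.get? s with _ | v
    · by_cases hin : PySem.Chars.isIn s.toList line.toList = true
      · simp [hs, hin]
      · simp only [Bool.not_eq_true] at hin
        simp [hs, hin]
    · simp

-- ===== VERDICT (by name: the statement is the Claim_ definition above) =====
theorem search_free_students_spec : Claim_equal_search_free_students := by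
  intro fsd day session lines _
  simp only [Spec_search_free_students, search_free_students, search_free_students_alt]
  rw [PySem.List.foldl_append_if
      (p := fun p : String × List (String × List String) =>
        ((PySem.Dict.mk p.2).getD day []).contains session)
      (f := fun p : String × List (String × List String) => p.1)]
  simp only [List.nil_append]
  have hbody : (fun (acc : List String) (student : String) =>
      match lines.filter (fun line => PySem.Str.isIn student line) with
      | [] => acc ++ [student]
      | m :: _ => acc ++ [student ++ " - " ++ ((PySem.Str.split? (PySem.Str.strip m) "\t").getD []).headD ""]) =
      (fun acc student => acc ++ [match lines.filter (fun line => PySem.Str.isIn student line) with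
      | [] => student
      | m :: _ => student ++ " - " ++ sfsNim m]) := by
    funext acc student
    cases lines.filter (fun line => PySem.Str.isIn student line) <;> rfl
  rw [hbody, PySem.List.foldl_append_singleton_eq_map, List.nil_append]
  apply List.map_congr_left
  intro s hsf
  rw [sfs_outer_get _ lines PySem.Dict.empty s hsf]
  simp only [PySem.Dict.get?_empty, Option.none_or]
  cases lines.filter (fun l => PySem.Str.isIn s l) <;> rfl
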